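-- pv_equiv track=rewrite | github.com/pypi-data/pypi-mirror-127 | packages/zippyshare/zippyshare-0.2.0-py3-none-any.whl/zippyshare/utils.py | read_account_info
-- ===== SOURCE A (Python) =====
-- def read_account_info(s):
--     credentials = [[]]
--     for line in s.splitlines():
--         if not line:
--             credentials.append([])
--             continue
--         credentials[-1].append(line)
--     return credentials
-- ===== SOURCE B (Python) =====
-- def read_account_info(s):
--     def go(lines):
--         try:
--             i = lines.index('')
--         except ValueError:
--             return [lines]
--         return [lines[:i]] + go(lines[i + 1:])
--     return go(s.splitlines())
-- ===== Notes on version B (the rewrite author's own statement) =====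
-- stated objective: alternative
-- what changed: Replaces A's single mutating loop (append-to-last-sublist, push a fresh sublist at each blank line) with a recursion that locates the first blank line with list.index and slices the block off the front, recursing on the remainder.
import Mathlib
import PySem

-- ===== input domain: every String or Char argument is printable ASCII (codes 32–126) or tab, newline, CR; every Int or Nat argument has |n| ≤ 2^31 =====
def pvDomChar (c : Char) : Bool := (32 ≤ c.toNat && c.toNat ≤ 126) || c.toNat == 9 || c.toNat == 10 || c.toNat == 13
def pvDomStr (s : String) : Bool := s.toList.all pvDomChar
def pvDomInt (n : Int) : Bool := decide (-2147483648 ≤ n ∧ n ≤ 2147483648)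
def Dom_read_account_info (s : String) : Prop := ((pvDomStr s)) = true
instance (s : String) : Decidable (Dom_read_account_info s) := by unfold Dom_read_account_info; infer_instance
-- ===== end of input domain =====

-- B replaces A's mutating accumulator loop by a recursion on the index of the first blank line (alternative decomposition, same cost).

-- ===== PORT A =====
-- one step of A's loop body: blank line starts a new sublist, otherwise append to the last sublist
def pvStepA (cred : List (List String)) (line : String) : List (List String) :=
  if line == "" then cred ++ [[]]
  else cred.dropLast ++ [cred.getLastD [] ++ [line]]

def read_account_info (s : String) : List (List String) :=
  (PySem.Str.splitlines s).foldl pvStepA [[]]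

-- ===== PORT B =====
-- B's helper go: try lines.index('') / except ValueError ported as match on PySem.List.index?
def pvGoB (lines : List String) : List (List String) :=
  match h : PySem.List.index? lines "" with
  | none => [lines]
  | some i =>
      [PySem.List.slice lines none (some (i : Int))] ++
        pvGoB (PySem.List.slice lines (some ((i : Int) + 1)) none)
termination_by lines.length
decreasing_by
  obtain ⟨hk, -, -⟩ := PySem.List.getElem_of_index?_eq_some h
  have : ((i : Int) + 1) = ((i + 1 : Nat) : Int) := by push_cast; ring
  rw [this, PySem.List.slice_from_natCast]
  simp [List.length_drop]; omega

def read_account_info_alt (s : String) : List (List String) :=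
  pvGoB (PySem.Str.splitlines s)

-- ===== PRECONDITION & SPEC =====
def Spec_read_account_info (s : String) (out : List (List String)) : Prop := out = read_account_info_alt s
instance (s : String) (out : List (List String)) : Decidable (Spec_read_account_info s out) := by unfold Spec_read_account_info; infer_instance

-- ===== CLAIM (what is proved, stated in full; the proofs are below) =====
def Claim_equal_read_account_info : Prop := ∀ (s : String), Dom_read_account_info s → Spec_read_account_info s (read_account_info s)

-- ===== LEMMAS AND PROOFS =====

-- prepend cur to the head block (used to state A's loop invariant)
def pvHmap (cur : List String) : List (List String) → List (List String)
  | [] => [cur]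
  | b :: bs => (cur ++ b) :: bs

theorem pvGoB_ne_nil (ls : List String) : pvGoB ls ≠ [] := by
  unfold pvGoB
  split <;> simp

theorem pvGoB_nil : pvGoB [] = [[]] := by
  unfold pvGoB
  split <;> simp_all [PySem.List.index?_eq_idxOf?]

theorem pvGoB_cons_blank (ls : List String) : pvGoB ("" :: ls) = [] :: pvGoB ls := by
  rw [pvGoB, PySem.List.index?_cons_self]
  show [PySem.List.slice ("" :: ls) none (some ((0:Nat):Int))] ++
      pvGoB (PySem.List.slice ("" :: ls) (some (((0:Nat):Int) + 1)) none) = [] :: pvGoB ls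
  rw [show (((0:Nat):Int) + 1) = ((1:Nat):Int) from by norm_num]
  rw [PySem.List.slice_to_natCast, PySem.List.slice_from_natCast]
  simp

theorem pvGoB_cons_ne (l : String) (ls : List String) (h : l ≠ "") :
    pvGoB (l :: ls) = match pvGoB ls with
      | [] => [[l]]
      | b :: bs => (l :: b) :: bs := by
  rw [pvGoB]
  rw [PySem.List.index?_cons_of_ne ls h]
  cases hidx : PySem.List.index? ls "" with
  | none =>
      simp only [Option.map_none]
      rw [pvGoB, hidx]
  | some i =>
      simp only [Option.map_some]
      rw [show (((i+1 : Nat)) : Int) + 1 = ((i + 2 : Nat) : Int) from by push_cast; ring]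
      rw [PySem.List.slice_to_natCast, PySem.List.slice_from_natCast]
      conv_rhs => rw [pvGoB, hidx]
      simp only [PySem.List.slice_to_natCast]
      rw [show ((i : Nat) : Int) + 1 = ((i + 1 : Nat) : Int) from by push_cast; ring]
      rw [PySem.List.slice_from_natCast]
      simp [List.take_succ_cons, List.drop_succ_cons]

theorem pvFoldA (ls : List String) :
    ∀ (pre : List (List String)) (cur : List String),
      ls.foldl pvStepA (pre ++ [cur]) = pre ++ pvHmap cur (pvGoB ls) := by
  induction ls with
  | nil => intro pre cur; simp [pvGoB_nil, pvHmap]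
  | cons l ls ih =>
      intro pre cur
      by_cases hl : l = ""
      · subst hl
        have step : pvStepA (pre ++ [cur]) "" = (pre ++ [cur]) ++ [[]] := by
          simp [pvStepA]
        rw [List.foldl_cons, step, ih (pre ++ [cur]) []]
        rw [pvGoB_cons_blank]
        cases hg : pvGoB ls with
        | nil => exact absurd hg (pvGoB_ne_nil ls)
        | cons b bs => simp [pvHmap]
      · have step : pvStepA (pre ++ [cur]) l = pre ++ [cur ++ [l]] := by
          simp [pvStepA, hl]
        rw [List.foldl_cons, step, ih pre (cur ++ [l])]
        rw [pvGoB_cons_ne l ls hl]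
        cases hg : pvGoB ls with
        | nil => exact absurd hg (pvGoB_ne_nil ls)
        | cons b bs => simp [pvHmap]

-- ===== VERDICT (by name: the statement is the Claim_ definition above) =====
theorem read_account_info_spec : Claim_equal_read_account_info := by
  intro s _
  unfold Spec_read_account_info read_account_info read_account_info_alt
  have h := pvFoldA (PySem.Str.splitlines s) [] []
  simp only [List.nil_append] at h
  rw [h]
  cases hg : pvGoB (PySem.Str.splitlines s) with
  | nil => exact absurd hg (pvGoB_ne_nil _)
  | cons b bs => simp [pvHmap]
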